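/- GENERATED by mk_final_copies.py from the proof of the farm's unit `stb_vorbis_get_frame_float.4` (farm:stb_vorbis_get_frame_float.4.1: Proof.lean) as the
   re-elaboration sweep compiled it — do not edit. -/
import Asan.CheckWalk
import Vorbis.Spec.Units.stb_vorbis_get_frame_float_4
import Vorbis.Spec.Worked.stb_vorbis_get_frame_float_4_Lemmas

/- SEGMENT 4 OF stb_vorbis_get_frame_float: ONE ROUND of `for (i = 0; i < f->channels; ++i) f->outputs[i] = f->channel_buffers[i] + left;`
   (stb_vorbis_fixed.c 5066–5067), from the loop head 1197F5H (`AtLoop … i`) to the head again (`AtLoop … (i + 1)`) or to the exit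
   119806H (`AtStores`). One walk of 17 instructions with three check sites, all of them fields of `*f` (`DecodeInv.objLive`); the round
   stores a dead return address below the steady stack pointer and `outputs[i]`; the assertions are carried over these stores by the
   lemmas of Lemmas.lean (`seg4_gbody`, `seg4_fields`, `seg4_stored`). -/
open X86 X86.User Asan Vorbis Vorbis.Spec

set_option maxRecDepth 4000
set_option maxHeartbeats 4000000

/-- **Segment 4 of `stb_vorbis_get_frame_float`**: one round of the loop at 1197F5H, from `AtLoop … i` to `AtLoop … (i + 1)` (the body:
`i < channels`) or to `AtStores` (the exit 119806H: `i = channels`). -/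
theorem Vorbis.Spec.Worked.stb_vorbis_get_frame_float_4_ok : Vorbis.Spec.stb_vorbis_get_frame_float_4.Statement := by
  intro Lay hLay μ hμ u₀ hcode hload8 hstore8 hload4 others frames len A stored room ysz u ret f left r ch i v hat
  -- 1. the ENTRY state's facts, from the `AtEntry` the assertion carries
  have he := hat.body.frame.entry
  have hf := hat.body.frame.rdi
  v_entry he
  -- 2. the assertion's fields; `hbody` stays whole for the carrying lemmas
  obtain ⟨j_rip, hbody, j_r13, hchan, hile, hslr, hsllen, hr31, hslleft, hleft31, hbound, houts⟩ := hat
  have hinv := hbody.frame.shadow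
  have hdi := hbody.frame.dinv
  have j_inv := hbody.frame.inv
  have hwf := stb_vorbis_get_frame_float.gff_obj_where hdi
  have hrdi : u.reg .rdi = addr f := eq_addr _ _ hf
  -- HD1: the dword at `f + 4` is `ch`, `1 ≤ ch ≤ 16`
  obtain ⟨rch, hch1, hch16⟩ := Vorbis.Spec.stb_vorbis_get_frame_float_4.seg4_chan_read hchan hdi.config.header.HD1
  have hi31 : i < 2 ^ 31 := by omega
  -- the PRESENT state's facts under names the walker keeps
  have c_rsp : v.reg .rsp = u.reg .rsp - 184 := hbody.frame.rsp
  have c_rbx : v.reg .rbx = addr f := by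
    rw [← hrdi]
    exact hbody.rbx
  have c_r13 : v.reg .r13 = UInt64.ofNat i := j_r13
  have w_rip := j_rip
  have w_eq := Vorbis.conv_code_eqOn hbody.frame.code
  have hdf : v.flags .df = false := (show X86.User.abiInv _ from j_inv).1
  have hmx : v.mxcsr &&& 0x1F80 = 0x1F80 := (show X86.User.abiInv _ from j_inv).2
  have w_kept : RegsKept [.rsp, .rbx, .r13] v v := RegsKept.refl _ _
  -- 3. the walk: 1197F5H … 119804H, then the body 1197B7H … 1197F1H or the exit 119806H
  u_walk hcode [hμ.vendor, cnt32_sext i hi31] until [Vorbis.L.stb_vorbis_get_frame_float.loop1,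
    Vorbis.L.stb_vorbis_get_frame_float.at_119806] span [Vorbis.L.textLo, Vorbis.L.textHi] side (v_side)
  · -- check 1197F9H (line 5066): `f->channels`, a field of `*f`
    have hun : ShadowUntouched v.mem s_1197f9.mem := by v_untouched
    refine hdi.objLive.accSmall hinv hun _ 4 (by decide) (by u_omega) ?_
    simp only [Vorbis.Off.sizeof.stb_vorbis]
    u_omega
  · -- check 1197C7H (line 5067): `f->channel_buffers[i]`, `i < channels ≤ 16`
    rw [cnt32_part_toInt i hi31, cnt32_toInt ch (by omega)] at hbr_119804
    have hun : ShadowUntouched v.mem s_1197c7.mem := by v_untouched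
    refine hdi.objLive.accSmall hinv hun _ 8 (by decide) (by u_omega) ?_
    simp only [Vorbis.Off.sizeof.stb_vorbis]
    u_omega
  · -- check 1197E7H (line 5067): `f->outputs[i]`
    rw [cnt32_part_toInt i hi31, cnt32_toInt ch (by omega)] at hbr_119804
    have hun : ShadowUntouched v.mem s_1197e7.mem := by v_untouched
    refine hdi.objLive.accSmall hinv hun _ 8 (by decide) (by u_omega) ?_
    simp only [Vorbis.Off.sizeof.stb_vorbis]
    u_omega
  · -- the back edge 1197F1H → 1197F5H: `AtLoop … (i + 1)`
    rw [cnt32_part_toInt i hi31, cnt32_toInt ch (by omega)] at hbr_119804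
    have hilt : i < ch := by omega
    have hi16 : i < 16 := by omega
    rw [Vorbis.Spec.stb_vorbis_get_frame_float_4.seg4_addr_out f i hwf.2.1 hi16,
      Vorbis.Spec.stb_vorbis_get_frame_float_4.seg4_addr_cb f i hwf.2.1 hi16] at w_mem
    -- what the round stored: a dead return address, `outputs[i]`
    have ea : (addr (f + 1000 + 8 * i)).toNat = f + 1000 + 8 * i := toNat_addr _ (by omega)
    have hs : Mem.SameExcept [⟨(u.reg .rsp).toNat - 192, (u.reg .rsp).toNat - 184⟩,
        ⟨f + 1000 + 8 * i, f + 1008 + 8 * i⟩] v.mem s_1197f1.mem := by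
      rw [w_mem]
      u_same
    have hi' : (conv u₀).inv s_1197f1 := by v_inv
    have hbody' := Vorbis.Spec.stb_vorbis_get_frame_float_4.seg4_gbody hbody hs (by omega) (by omega) w_rsp
      (w_kept.get .r14 rfl) (w_rbx.trans c_rbx.symm) (Vorbis.conv_code_in w_eq) hi'
    obtain ⟨fch, fb1, fr, flen, fleft, fcb, fout⟩ :=
      Vorbis.Spec.stb_vorbis_get_frame_float_4.seg4_fields hbody hs (by omega) (by omega)
    -- M6: `channel_buffers[i]` is the base of an allocated block
    have hcb : stb_vorbis.channel_buffers v.mem f i ≤ 0xC00000 := by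
      have hblk := (hdi.fb.vorbis.buffers.M6 i (by rw [hchan]; omega)).1
      have hin := hdi.ok.inside _ hblk
      simp only [] at hin
      omega
    refine ReachVia.done (Or.inl ⟨w_rip, hbody', ?_, ?_, hilt, ?_, ?_, hr31, ?_, hleft31, ?_, ?_⟩)
    · rw [w_r13]
      exact cnt32_succ i (by omega)
    · rw [fch]
      exact hchan
    · rw [fr]
      exact hslr
    · rw [flen]
      exact hsllen
    · rw [fleft]
      exact hslleft
    · rw [fb1]
      exact hbound
    · intro c hc
      by_cases hci : c = i
      · subst hci
        rw [fcb c hi16, w_mem]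
        exact Vorbis.Spec.stb_vorbis_get_frame_float_4.seg4_stored v.mem _ f c left hleft31 hcb
      · rw [fcb c (by omega), fout c (by omega) (by omega)]
        exact houts c (by omega)
  · -- the exit 119806H: `AtStores`, `i = ch`
    rw [cnt32_part_toInt i hi31, cnt32_toInt ch (by omega)] at hbr_119804
    have hich : i = ch := by omega
    have hs : Mem.SameExcept [⟨(u.reg .rsp).toNat - 192, (u.reg .rsp).toNat - 184⟩,
        ⟨f + 1000, f + 1000⟩] v.mem s_119804.mem := by
      rw [w_mem]
      u_same
    have hi' : (conv u₀).inv s_119804 := by v_inv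
    have hbody' := Vorbis.Spec.stb_vorbis_get_frame_float_4.seg4_gbody hbody hs (by omega) (by omega) w_rsp
      (w_kept.get .r14 rfl) (w_rbx.trans c_rbx.symm) (Vorbis.conv_code_in w_eq) hi'
    obtain ⟨fch, fb1, fr, flen, fleft, fcb, fout⟩ :=
      Vorbis.Spec.stb_vorbis_get_frame_float_4.seg4_fields hbody hs (by omega) (by omega)
    refine ReachVia.done (Or.inr ⟨w_rip, hbody', ?_, ?_, ?_, ?_, hr31, ?_, hleft31, ?_, ?_⟩)
    · rw [w_rbp]
      exact cnt32_ofBV ch (by omega)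
    · rw [fch]
      exact hchan
    · rw [fr]
      exact hslr
    · rw [flen]
      exact hsllen
    · rw [fleft]
      exact hslleft
    · rw [fb1]
      exact hbound
    · intro c hc
      rw [fcb c (by omega), fout c (by omega) (by omega)]
      exact houts c (by omega)
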